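-- pv_equiv track=rewrite | github.com/taalib-zama/coursera_Algorithmic_Toolbox_assignments | week2_algorithmic_warmup assignment/fibonacci_partial_sum.py | sum_fib
-- ===== SOURCE A (Python) =====
-- def sum_fib(m,n):
--     if m > n:
--         return
--
--
--     a = [0, 1]
--     for i in range(2, 60):
--         a.append(a[i-1] + a[i-2])
--
--     m = m % 60
--     n = n % 60
--     if n < m:
--         n += 60
--     sum = 0
--     for j in range(m, n+1):
--         sum += a[j % 60]
--
--     return sum % 10
-- ===== SOURCE B (Python) =====
-- def sum_fib(m, n):
--     if m > n:
--         return
--     # last digit of F_k via a tail-recursive pair walk (no table)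
--     def last(k, a=0, b=1):
--         return a if k == 0 else last(k - 1, b, (a + b) % 10)
--     # prefix-sum identity: sum_{i=m}^{n} F_i = F_{n+2} - F_{m+1}; Pisano period 60 mod 10
--     return (last((n + 2) % 60) - last((m + 1) % 60)) % 10
-- ===== Notes on version B (the rewrite author's own statement) =====
-- stated objective: simpler
-- what changed: Replaces A's 60-entry Fibonacci table plus O(range) summation loop with the prefix identity sum F_m..F_n = F_{n+2} - F_{m+1}, each term computed by a small tail-recursive last-digit pair walk (no table, no summation loop).
import Mathlib
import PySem

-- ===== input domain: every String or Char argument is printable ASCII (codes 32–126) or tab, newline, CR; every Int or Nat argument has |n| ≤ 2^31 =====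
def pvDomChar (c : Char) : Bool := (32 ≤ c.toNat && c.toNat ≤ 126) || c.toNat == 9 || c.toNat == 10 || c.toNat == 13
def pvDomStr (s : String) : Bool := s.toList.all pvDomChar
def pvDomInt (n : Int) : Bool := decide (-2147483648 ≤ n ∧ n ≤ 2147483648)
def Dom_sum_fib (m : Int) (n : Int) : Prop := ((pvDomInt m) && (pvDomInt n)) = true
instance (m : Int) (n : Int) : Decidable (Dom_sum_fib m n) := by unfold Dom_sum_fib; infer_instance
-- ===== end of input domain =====

-- B replaces A's table-building and range-summation loops by the prefix identity
-- sum F_m..F_n = F_(n+2) - F_(m+1), each term via a tail-recursive last-digit pair walk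
-- (objective: simpler; same behaviour, including None for m > n).

-- ===== PORT A =====
-- the body of A after the m > n guard, as a function of the already-reduced residues m % 60, n % 60
def sum_fib_core (mr : Int) (nr : Int) : Int :=
  -- a = [0, 1]; for i in range(2, 60): a.append(a[i-1] + a[i-2])
  let a : List Int := (PySem.List.pyRange 2 60 1).foldl
    (fun a i => a ++ [PySem.List.pyGetD a (i - 1) 0 + PySem.List.pyGetD a (i - 2) 0]) [0, 1]
  -- if n < m: n += 60
  let nr := if nr < mr then nr + 60 else nr
  -- sum = 0; for j in range(m, n+1): sum += a[j % 60]
  let sum : Int := (PySem.List.pyRange mr (nr + 1) 1).foldl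
    (fun s j => s + PySem.List.pyGetD a (PySem.Int.mod j 60) 0) 0
  PySem.Int.mod sum 10

def sum_fib (m : Int) (n : Int) : Option Int :=
  if m > n then none
  else some (sum_fib_core (PySem.Int.mod m 60) (PySem.Int.mod n 60))

-- ===== PORT B =====
-- def last(k, a=0, b=1): return a if k == 0 else last(k - 1, b, (a + b) % 10)
def fibLast : Nat → Int → Int → Int
  | 0, a, _ => a
  | k + 1, a, b => fibLast k b (PySem.Int.mod (a + b) 10)

-- return (last((n + 2) % 60) - last((m + 1) % 60)) % 10
-- (the % 60 results are non-negative in Python, so .toNat on them is exact)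
def sum_fib_alt (m : Int) (n : Int) : Option Int :=
  if m > n then none
  else some (PySem.Int.mod
    (fibLast (PySem.Int.mod (n + 2) 60).toNat 0 1 - fibLast (PySem.Int.mod (m + 1) 60).toNat 0 1) 10)

-- ===== PRECONDITION & SPEC =====
def Spec_sum_fib (m : Int) (n : Int) (out : Option Int) : Prop := out = sum_fib_alt m n
instance (m : Int) (n : Int) (out : Option Int) : Decidable (Spec_sum_fib m n out) := by unfold Spec_sum_fib; infer_instance

-- ===== CLAIM (what is proved, stated in full; the proofs are below) =====
def Claim_equal_sum_fib : Prop := ∀ (m : Int) (n : Int), Dom_sum_fib m n → Spec_sum_fib m n (sum_fib m n)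

-- ===== LEMMAS AND PROOFS =====

-- the two computations agree on every pair of residues (kernel evaluation of the 3600 cases)
set_option maxRecDepth 100000 in
theorem core_agree : ∀ a ∈ List.range 60, ∀ b ∈ List.range 60,
    sum_fib_core (a : Int) (b : Int)
      = PySem.Int.mod
          (fibLast (PySem.Int.mod ((b : Int) + 2) 60).toNat 0 1
            - fibLast (PySem.Int.mod ((a : Int) + 1) 60).toNat 0 1) 10 := by
  decide

theorem mod60_eq (x : Int) : PySem.Int.mod x 60 = x % 60 :=
  PySem.Int.mod_eq_emod_of_pos (by norm_num)

-- ===== VERDICT (by name: the statement is the Claim_ definition above) =====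
theorem sum_fib_spec : Claim_equal_sum_fib := by
  intro m n _
  unfold Spec_sum_fib sum_fib sum_fib_alt
  by_cases h : m > n
  · simp [h]
  · simp only [h, if_false]
    have hm : PySem.Int.mod m 60 = ((m % 60).toNat : Int) := by
      rw [mod60_eq]; omega
    have hn : PySem.Int.mod n 60 = ((n % 60).toNat : Int) := by
      rw [mod60_eq]; omega
    have hmem_m : (m % 60).toNat ∈ List.range 60 := by
      simp only [List.mem_range]; omega
    have hmem_n : (n % 60).toNat ∈ List.range 60 := by
      simp only [List.mem_range]; omega
    have e1 : PySem.Int.mod (n + 2) 60 = PySem.Int.mod ((((n % 60).toNat : Int)) + 2) 60 := by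
      rw [mod60_eq, mod60_eq]; omega
    have e2 : PySem.Int.mod (m + 1) 60 = PySem.Int.mod ((((m % 60).toNat : Int)) + 1) 60 := by
      rw [mod60_eq, mod60_eq]; omega
    rw [hm, hn, e1, e2, core_agree _ hmem_m _ hmem_n]
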